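-- pv_equiv track=rewrite | github.com/ghealysr/forge | forge/importers/sam_gov.py | _extract_poc_fields
-- ===== SOURCE A (Python) =====
-- from typing import Any, Dict, List, Optional, Tuple
--
-- def _extract_poc_fields(pocs: Dict) -> tuple:
--     """Extract POC email, name, and phone from SAM.gov points of contact."""
--     poc_email = poc_name = poc_phone = None
--     for poc_key in [
--         "governmentBusinessPOC",
--         "electronicBusinessPOC",
--         "governmentBusinessAlternatePOC",
--         "electronicBusinessAlternatePOC",
--     ]:
--         poc = pocs.get(poc_key, {})
--         if not poc:
--             continue
--         email = (poc.get("email") or "").strip().lower()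
--         if email and "@" in email and not poc_email:
--             poc_email = email
--         first = (poc.get("firstName") or "").strip()
--         middle = (poc.get("middleInitial") or "").strip()
--         last = (poc.get("lastName") or "").strip()
--         full_name = " ".join(p for p in [first, middle, last] if p)
--         if full_name and not poc_name:
--             poc_name = full_name
--         phone = (poc.get("USPhone") or "").strip()
--         if phone and not poc_phone:
--             poc_phone = phone
--     return poc_email, poc_name, poc_phone
-- ===== SOURCE B (Python) =====
-- _POC_KEYS = [
--     "governmentBusinessPOC",
--     "electronicBusinessPOC",
--     "governmentBusinessAlternatePOC",
--     "electronicBusinessAlternatePOC",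
-- ]
--
--
-- def _first_hit(pocs, extract):
--     """First truthy value of extract(poc) over the fixed key list; None if none."""
--     for key in _POC_KEYS:
--         poc = pocs.get(key, {})
--         if not poc:
--             continue
--         value = extract(poc)
--         if value is not None:
--             return value
--     return None
--
--
-- def _email_of(poc):
--     email = (poc.get("email") or "").strip().lower()
--     return email if "@" in email else None
--
--
-- def _name_of(poc):
--     parts = [(poc.get(k) or "").strip() for k in ("firstName", "middleInitial", "lastName")]
--     return " ".join(p for p in parts if p) or None
--
--
-- def _phone_of(poc):
--     return (poc.get("USPhone") or "").strip() or None
--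
--
-- def _extract_poc_fields(pocs):
--     """Extract POC email, name, and phone from SAM.gov points of contact."""
--     return (
--         _first_hit(pocs, _email_of),
--         _first_hit(pocs, _name_of),
--         _first_hit(pocs, _phone_of),
--     )
-- ===== Notes on version B (the rewrite author's own statement) =====
-- stated objective: simpler
-- what changed: Replaces A's single pass that threads three mutable slots through the key loop with a generic first-hit helper called three times (one independent early-returning scan per field, with a small extractor for email/name/phone).
import Mathlib
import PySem

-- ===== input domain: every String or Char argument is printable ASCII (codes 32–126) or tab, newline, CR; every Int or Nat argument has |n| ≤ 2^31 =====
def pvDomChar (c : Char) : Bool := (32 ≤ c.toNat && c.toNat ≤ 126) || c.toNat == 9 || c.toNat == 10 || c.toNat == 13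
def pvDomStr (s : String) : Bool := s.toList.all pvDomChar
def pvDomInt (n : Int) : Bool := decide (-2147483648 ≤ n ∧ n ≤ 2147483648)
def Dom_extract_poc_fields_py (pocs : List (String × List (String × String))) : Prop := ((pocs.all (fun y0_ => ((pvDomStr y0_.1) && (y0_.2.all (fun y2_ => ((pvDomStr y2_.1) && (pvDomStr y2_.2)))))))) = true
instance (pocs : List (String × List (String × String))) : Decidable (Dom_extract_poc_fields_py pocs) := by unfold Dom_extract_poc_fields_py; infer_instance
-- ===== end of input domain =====

-- ===== PORT A =====
-- B is a 'simpler' decomposition: one helper scanning the fixed key list per field, instead of A's single stateful pass.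
def pvPocKeys : List String :=
  ["governmentBusinessPOC", "electronicBusinessPOC",
   "governmentBusinessAlternatePOC", "electronicBusinessAlternatePOC"]

-- pocs.get(key, {}) : first-match association-list lookup with {} default
def pvPocGet (pocs : List (String × List (String × String))) (k : String) :
    List (String × String) :=
  PySem.Dict.getD (PySem.Dict.mk pocs) k []

-- (poc.get(f) or "") : missing key and empty string both give ""
def pvField (poc : List (String × String)) (f : String) : String :=
  PySem.Dict.getD (PySem.Dict.mk poc) f ""

-- one iteration of A's loop body, updating the (email, name, phone) state
def pvStepA (pocs : List (String × List (String × String)))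
    (st : Option String × Option String × Option String) (k : String) :
    Option String × Option String × Option String :=
  let poc := pvPocGet pocs k
  if poc = [] then st
  else
    let email := PySem.Str.lower (PySem.Str.strip (pvField poc "email"))
    let e := if email ≠ "" ∧ PySem.Str.isIn "@" email ∧ st.1 = none then some email else st.1
    let first := PySem.Str.strip (pvField poc "firstName")
    let middle := PySem.Str.strip (pvField poc "middleInitial")
    let last := PySem.Str.strip (pvField poc "lastName")
    let fullName := PySem.Str.join " " (([first, middle, last]).filter (fun p => p ≠ ""))
    let n := if fullName ≠ "" ∧ st.2.1 = none then some fullName else st.2.1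
    let phone := PySem.Str.strip (pvField poc "USPhone")
    let p := if phone ≠ "" ∧ st.2.2 = none then some phone else st.2.2
    (e, n, p)

def extract_poc_fields_py (pocs : List (String × List (String × String))) :
    Option String × Option String × Option String :=
  pvPocKeys.foldl (pvStepA pocs) (none, none, none)

-- ===== PORT B =====
-- email extractor: strip+lower, keep only if it contains '@' (then automatically nonempty)
def pvEmailOf (poc : List (String × String)) : Option String :=
  let email := PySem.Str.lower (PySem.Str.strip (pvField poc "email"))
  if PySem.Str.isIn "@" email then some email else none

-- name extractor: join the nonempty stripped parts; 'or None' when the join is empty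
def pvNameOf (poc : List (String × String)) : Option String :=
  let parts := (["firstName", "middleInitial", "lastName"]).map
    (fun k => PySem.Str.strip (pvField poc k))
  let full := PySem.Str.join " " (parts.filter (fun p => p ≠ ""))
  if full = "" then none else some full

-- phone extractor: stripped USPhone, 'or None' when empty
def pvPhoneOf (poc : List (String × String)) : Option String :=
  let phone := PySem.Str.strip (pvField poc "USPhone")
  if phone = "" then none else some phone

-- first non-None value of the extractor over the key list, skipping falsy POCs
def pvFirstHit (pocs : List (String × List (String × String)))
    (f : List (String × String) → Option String) : List String → Option String
  | [] => none
  | k :: rest =>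
    let poc := pvPocGet pocs k
    if poc = [] then pvFirstHit pocs f rest
    else
      match f poc with
      | some v => some v
      | none => pvFirstHit pocs f rest

def extract_poc_fields_py_alt (pocs : List (String × List (String × String))) :
    Option String × Option String × Option String :=
  (pvFirstHit pocs pvEmailOf pvPocKeys,
   pvFirstHit pocs pvNameOf pvPocKeys,
   pvFirstHit pocs pvPhoneOf pvPocKeys)


-- ===== PRECONDITION & SPEC =====
def Spec_extract_poc_fields_py (pocs : List (String × List (String × String))) (out : Option String × Option String × Option String) : Prop := out = extract_poc_fields_py_alt pocs
instance (pocs : List (String × List (String × String))) (out : Option String × Option String × Option String) : Decidable (Spec_extract_poc_fields_py pocs out) := by unfold Spec_extract_poc_fields_py; infer_instance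

-- ===== CLAIM (what is proved, stated in full; the proofs are below) =====
def Claim_equal_extract_poc_fields_py : Prop := ∀ (pocs : List (String × List (String × String))), Dom_extract_poc_fields_py pocs → Spec_extract_poc_fields_py pocs (extract_poc_fields_py pocs)

-- ===== LEMMAS AND PROOFS =====

-- a string containing '@' is nonempty
theorem pvIsInAt_ne_empty (v : String) (h : PySem.Str.isIn "@" v = true) : v ≠ "" := by
  intro h0
  rw [h0] at h
  rw [PySem.Str.isIn_iff_infix] at h
  simp at h

theorem pvFirstHit_cons_ne (pocs : List (String × List (String × String)))
    (f : List (String × String) → Option String) (k : String) (rest : List String)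
    (h : ¬ pvPocGet pocs k = []) :
    pvFirstHit pocs f (k :: rest) = (f (pvPocGet pocs k)).or (pvFirstHit pocs f rest) := by
  cases h' : f (pvPocGet pocs k) <;> simp [pvFirstHit, h, h']

-- A's 'first, if unset and truthy' update against B's 'value or None' probe
theorem pvOrStepTruthy (v : String) (e r : Option String) :
    (if v ≠ "" ∧ e = none then some v else e).or r
      = e.or ((if v = "" then none else some v).or r) := by
  cases e <;> by_cases h : v = "" <;> simp [h]

-- same, for the email field whose probe condition is 'contains @' (which forces nonemptiness)
theorem pvOrStepEmail (c : Bool) (v : String) (e r : Option String)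
    (hv : c = true → v ≠ "") :
    (if v ≠ "" ∧ c = true ∧ e = none then some v else e).or r
      = e.or ((if c = true then some v else none).or r) := by
  cases e <;> cases c <;> simp [hv]

-- A's fold over any key suffix equals componentwise 'state <|> first hit of the suffix'.
theorem pvFoldA_eq (pocs : List (String × List (String × String)))
    (keys : List String) (st : Option String × Option String × Option String) :
    keys.foldl (pvStepA pocs) st =
      (st.1.or (pvFirstHit pocs pvEmailOf keys),
       st.2.1.or (pvFirstHit pocs pvNameOf keys),
       st.2.2.or (pvFirstHit pocs pvPhoneOf keys)) := by
  induction keys generalizing st with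
  | nil => simp [pvFirstHit]
  | cons k rest ih =>
    by_cases hp : pvPocGet pocs k = []
    · simp only [List.foldl_cons, pvStepA, hp, ih, pvFirstHit, ite_true]
    · rw [List.foldl_cons, ih,
        pvFirstHit_cons_ne pocs pvEmailOf k rest hp,
        pvFirstHit_cons_ne pocs pvNameOf k rest hp,
        pvFirstHit_cons_ne pocs pvPhoneOf k rest hp]
      simp only [pvStepA, pvEmailOf, pvNameOf, pvPhoneOf, if_neg hp,
        List.map_cons, List.map_nil]
      refine Prod.ext ?_ (Prod.ext ?_ ?_) <;> dsimp only
      · exact pvOrStepEmail _ _ _ _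
          (pvIsInAt_ne_empty (PySem.Str.lower (PySem.Str.strip (pvField (pvPocGet pocs k) "email"))))
      · exact pvOrStepTruthy _ _ _
      · exact pvOrStepTruthy _ _ _

-- ===== VERDICT (by name: the statement is the Claim_ definition above) =====
theorem extract_poc_fields_py_spec : Claim_equal_extract_poc_fields_py := by
  intro pocs _
  show extract_poc_fields_py pocs = extract_poc_fields_py_alt pocs
  simp [extract_poc_fields_py, extract_poc_fields_py_alt, pvFoldA_eq]
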